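-- pv_equiv track=rewrite | github.com/gaurav-singh-au16/Online-Judges | Binary_Search_Problems/longest_consucetive_duplicates.py | solve
-- ===== SOURCE A (Python) =====
-- def solve(s):
--     ans = 0
--     count = 0
--     p1 = 0
--     p2 = 1
--     if len(s) == 0:
--         return 0
--
--     while p2 < len(s):
--         if s[p1] != s[p2]:
--             if ans < count:
--                 ans = count
--                 count = 0
--             else:
--                 count = 0
--
--             p1 += 1
--             p2 += 1
--         elif s[p1] == s[p2]:
--             count += 1
--             p1 += 1
--             p2 += 1
--
--     if ans < count:
--         ans = count
--         count = 0
--     else: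
--         count = 0
--     return ans+1
-- ===== SOURCE B (Python) =====
-- def solve(s):
--     # Build the run-length encoding of s, then return the longest run (0 for empty).
--     runs = []
--     for c in s:
--         if runs and runs[-1][0] == c:
--             runs[-1][1] += 1
--         else:
--             runs.append([c, 1])
--     return max((n for _, n in runs), default=0)
-- ===== Notes on version B (the rewrite author's own statement) =====
-- stated objective: simpler
-- what changed: Replaces the two-pointer pair-comparison loop (tracking ans/count of equal adjacent pairs, returning ans+1) by building the run-length encoding of the string and taking the maximum run length with default 0.
import Mathlib
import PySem

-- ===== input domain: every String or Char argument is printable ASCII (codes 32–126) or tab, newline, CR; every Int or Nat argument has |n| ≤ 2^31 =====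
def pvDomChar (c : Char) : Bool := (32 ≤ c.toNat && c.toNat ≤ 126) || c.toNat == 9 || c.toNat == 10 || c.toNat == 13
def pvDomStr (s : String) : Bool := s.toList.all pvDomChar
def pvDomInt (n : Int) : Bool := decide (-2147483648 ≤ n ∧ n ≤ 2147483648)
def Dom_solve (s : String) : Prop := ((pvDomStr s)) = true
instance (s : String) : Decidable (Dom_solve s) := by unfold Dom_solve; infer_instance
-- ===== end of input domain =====

-- B replaces A's two-pointer ans/count loop by run-length encoding + maximum (simpler decomposition).

-- ===== PORT A =====
-- A's while loop walks p1/p2 over adjacent positions; ported as structural recursion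
-- where `prev` is s[p1] and the list is the suffix from p2.
def solveLoop (prev : Char) (rest : List Char) (ans count : Int) : Int :=
  match rest with
  | [] => if ans < count then count + 1 else ans + 1
  | c :: rest' =>
    if prev ≠ c then
      if ans < count then solveLoop c rest' count 0 else solveLoop c rest' ans 0
    else
      solveLoop c rest' ans (count + 1)

def solve (s : String) : Int :=
  match s.toList with
  | [] => 0
  | c :: rest => solveLoop c rest 0 0

-- ===== PORT B =====
-- `if runs and runs[-1][0] == c: runs[-1][1] += 1 else: runs.append([c, 1])`
def addChar (runs : List (Char × Int)) (c : Char) : List (Char × Int) :=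
  match runs.getLast? with
  | some (p, n) => if p == c then runs.dropLast ++ [(p, n + 1)] else runs ++ [(c, 1)]
  | none => runs ++ [(c, 1)]

def solve_alt (s : String) : Int :=
  (((s.toList.foldl addChar []).map Prod.snd).max?).getD 0

-- ===== PRECONDITION & SPEC =====
def Spec_solve (s : String) (out : Int) : Prop := out = solve_alt s
instance (s : String) (out : Int) : Decidable (Spec_solve s out) := by unfold Spec_solve; infer_instance

-- ===== CLAIM (what is proved, stated in full; the proofs are below) =====
def Claim_equal_solve : Prop := ∀ (s : String), Dom_solve s → Spec_solve s (solve s)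

-- ===== LEMMAS AND PROOFS =====

-- reference function: longest run of the list `prev :: l`, where `n` is the length
-- of the current run ending at `prev`
def gRun (prev : Char) (l : List Char) (n : Int) : Int :=
  match l with
  | [] => n
  | c :: rest => if c = prev then gRun c rest (n + 1) else max n (gRun c rest 1)

theorem gRun_ge (l : List Char) : ∀ (prev : Char) (n : Int), n ≤ gRun prev l n := by
  induction l with
  | nil => intro prev n; simp [gRun]
  | cons c rest ih =>
    intro prev n
    simp only [gRun]
    split
    · exact le_trans (by omega) (ih c (n + 1))
    · exact le_max_left _ _

theorem solveLoop_eq (l : List Char) :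
    ∀ (prev : Char) (ans count : Int),
      solveLoop prev l ans count = max (ans + 1) (gRun prev l (count + 1)) := by
  induction l with
  | nil =>
    intro prev ans count
    simp only [solveLoop, gRun]
    split <;> omega
  | cons c rest ih =>
    intro prev ans count
    simp only [solveLoop, gRun]
    by_cases h : c = prev
    · simp [h, ih]
    · have hne : prev ≠ c := fun hh => h hh.symm
      simp only [if_pos hne, if_neg h]
      split <;> rw [ih] <;> simp only [zero_add] <;> omega

theorem maxD_append (l : List Int) (k : Int) (hk : 0 ≤ k) :
    ((l ++ [k]).max?).getD 0 = max ((l.max?).getD 0) k := by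
  cases l with
  | nil => simp [List.max?]; omega
  | cons a l => simp [List.max?, List.foldl_append]

theorem foldl_addChar (l : List Char) :
    ∀ (rs : List (Char × Int)) (prev : Char) (k : Int), 1 ≤ k →
      (((l.foldl addChar (rs ++ [(prev, k)])).map Prod.snd).max?).getD 0
        = max ((((rs).map Prod.snd).max?).getD 0) (gRun prev l k) := by
  induction l with
  | nil =>
    intro rs prev k hk
    simp only [List.foldl_nil, gRun, List.map_append]
    exact maxD_append _ _ (by omega)
  | cons c rest ih =>
    intro rs prev k hk
    have hlast : (rs ++ [(prev, k)]).getLast? = some (prev, k) := by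
      simp
    have hdrop : (rs ++ [(prev, k)]).dropLast = rs := by
      simp
    simp only [List.foldl_cons, addChar, hlast, hdrop, gRun]
    by_cases h : prev = c
    · subst h
      simp only [beq_self_eq_true, if_true]
      exact ih rs prev (k + 1) (by omega)
    · have hb : (prev == c) = false := by simp [h]
      have hc : ¬ (c = prev) := fun hh => h hh.symm
      simp only [hb, Bool.false_eq_true, if_false, if_neg hc]
      rw [ih (rs ++ [(prev, k)]) c 1 (by omega), List.map_append, List.map_cons,
        List.map_nil, maxD_append _ k (by omega)]
      omega
  
-- ===== VERDICT (by name: the statement is the Claim_ definition above) =====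
theorem solve_spec : Claim_equal_solve := by
  intro s _
  unfold Spec_solve solve solve_alt
  cases h : s.toList with
  | nil => simp
  | cons c rest =>
    show solveLoop c rest 0 0 = ((((c :: rest).foldl addChar []).map Prod.snd).max?).getD 0
    rw [solveLoop_eq]
    have h1 : List.foldl addChar [] (c :: rest) = List.foldl addChar ([] ++ [(c, 1)]) rest := by
      simp [addChar]
    rw [h1, foldl_addChar rest [] c 1 (by omega)]
    have h2 := gRun_ge rest c 1
    simp only [List.map_nil, List.max?_nil, Option.getD_none, zero_add]
    omega
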